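-- pv_equiv track=rewrite | github.com/jikhanjung/PaleoBERT | src/normalization.py | validate_normalization
-- ===== SOURCE A (Python) =====
-- from typing import Dict, Tuple, List, Optional
--
-- def validate_normalization(
--     raw_text: str,
--     norm_text: str,
--     align_map: Dict[int, int]
-- ) -> bool:
--     """
--     Validate normalization results.
--
--     Checks:
--     1. Alignment map covers all raw text characters
--     2. Alignment map indices are valid for norm_text
--     3. No missing or duplicate mappings
--
--     Args:
--         raw_text: Original text
--         norm_text: Normalized text
--         align_map: Alignment map
--
--     Returns:
--         True if valid, False otherwise
--     """
--     # Check 1: All raw characters are mapped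
--     if len(align_map) != len(raw_text):
--         return False
--
--     # Check 2: All indices are in range
--     for raw_idx, norm_idx in align_map.items():
--         if raw_idx < 0 or raw_idx >= len(raw_text):
--             return False
--         if norm_idx < 0 or norm_idx >= len(norm_text):
--             return False
--
--     # Check 3: Mapping is sequential (raw indices should be continuous)
--     expected_indices = set(range(len(raw_text)))
--     actual_indices = set(align_map.keys())
--     if expected_indices != actual_indices:
--         return False
--
--     return True
-- ===== SOURCE B (Python) =====
-- def validate_normalization(raw_text, norm_text, align_map):
--     # Length guard, then one forward pass over the expected index range:
--     # coverage and value-range validation together.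
--     if len(align_map) != len(raw_text):
--         return False
--     n = len(norm_text)
--     for i in range(len(raw_text)):
--         if i not in align_map:
--             return False
--         v = align_map[i]
--         if v < 0 or v >= n:
--             return False
--     return True
-- ===== Notes on version B (the rewrite author's own statement) =====
-- stated objective: simpler
-- what changed: Replaces A's items loop plus two-set construction and comparison with a single forward pass over range(len(raw_text)) that checks membership and value range per index; the length guard makes the key-set comparison redundant.
import Mathlib
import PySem

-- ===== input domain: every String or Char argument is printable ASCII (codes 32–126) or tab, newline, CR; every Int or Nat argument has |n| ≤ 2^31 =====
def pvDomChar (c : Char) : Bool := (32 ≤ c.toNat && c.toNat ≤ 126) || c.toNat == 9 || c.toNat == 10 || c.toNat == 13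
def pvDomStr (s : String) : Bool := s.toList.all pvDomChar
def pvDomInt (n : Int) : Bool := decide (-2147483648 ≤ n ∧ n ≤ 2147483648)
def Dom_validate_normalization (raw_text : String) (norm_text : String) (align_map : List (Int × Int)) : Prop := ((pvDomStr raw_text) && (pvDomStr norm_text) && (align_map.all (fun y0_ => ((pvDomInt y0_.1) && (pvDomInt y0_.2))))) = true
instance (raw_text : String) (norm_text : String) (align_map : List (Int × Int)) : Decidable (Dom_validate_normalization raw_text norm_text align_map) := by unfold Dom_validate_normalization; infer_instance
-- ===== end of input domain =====

-- B replaces A's items loop plus two-set construction/comparison by a single forward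
-- pass over the expected index range (objective: simpler); return values agree on all inputs.

-- ===== PORT A =====
def validate_normalization (raw_text : String) (norm_text : String) (align_map : List (Int × Int)) : Bool :=
  -- Check 1: if len(align_map) != len(raw_text): return False
  if (align_map.length : Int) ≠ PySem.Str.len raw_text then false
  else
    -- Check 2: for raw_idx, norm_idx in align_map.items(): early `return False` as a flag
    if (align_map.foldl (fun ok p =>
      if p.1 < 0 || PySem.Str.len raw_text ≤ p.1 then false
      else if p.2 < 0 || PySem.Str.len norm_text ≤ p.2 then false
      else ok) true) = false then false
    else
      -- Check 3: set(range(len(raw_text))) != set(align_map.keys())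
      if !(PySem.Set.equal (PySem.Set.ofList (PySem.List.pyRange 0 (PySem.Str.len raw_text) 1))
          (PySem.Set.ofList (align_map.map (fun p => p.1)))) then false else true

-- ===== PORT B =====
def validate_normalization_alt (raw_text : String) (norm_text : String) (align_map : List (Int × Int)) : Bool :=
  if (align_map.length : Int) ≠ PySem.Str.len raw_text then false
  else
    -- for i in range(len(raw_text)): `i in align_map` / `align_map[i]` = first match in the assoc list
    (PySem.List.pyRange 0 (PySem.Str.len raw_text) 1).all (fun i =>
      match align_map.find? (fun p => p.1 == i) with
      | none => false
      | some p => !(p.2 < 0 || PySem.Str.len norm_text ≤ p.2))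

-- ===== PRECONDITION & SPEC =====
def Spec_validate_normalization (raw_text : String) (norm_text : String) (align_map : List (Int × Int)) (out : Bool) : Prop := out = validate_normalization_alt raw_text norm_text align_map
instance (raw_text : String) (norm_text : String) (align_map : List (Int × Int)) (out : Bool) : Decidable (Spec_validate_normalization raw_text norm_text align_map out) := by unfold Spec_validate_normalization; infer_instance

-- ===== CLAIM (what is proved, stated in full; the proofs are below) =====
def Claim_equal_validate_normalization : Prop := ∀ (raw_text : String) (norm_text : String) (align_map : List (Int × Int)), Dom_validate_normalization raw_text norm_text align_map → Spec_validate_normalization raw_text norm_text align_map (validate_normalization raw_text norm_text align_map)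

-- ===== LEMMAS AND PROOFS =====

-- first match in an assoc list with nodup keys is THE pair with that key
theorem pv_find_nodup (am : List (Int × Int)) (p : Int × Int)
    (hnd : (am.map Prod.fst).Nodup) (hp : p ∈ am) :
    am.find? (fun q => q.1 == p.1) = some p := by
  induction am with
  | nil => cases hp
  | cons a t ih =>
    simp only [List.map_cons, List.nodup_cons] at hnd
    rcases List.mem_cons.mp hp with rfl | hpt
    · simp [List.find?]
    · have hne : a.1 ≠ p.1 := fun h => hnd.1 (h ▸ List.mem_map_of_mem hpt)
      have hb : (a.1 == p.1) = false := by simpa using hne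
      simp [List.find?, hb, ih hnd.2 hpt]

-- the core equivalence, once the length guard has passed
theorem pv_core (am : List (Int × Int)) (L N : Int) (hL : 0 ≤ L)
    (hlen : (am.length : Int) = L) :
    ((am.all (fun p => !(p.1 < 0 || L ≤ p.1) && !(p.2 < 0 || N ≤ p.2))) &&
      PySem.Set.equal (PySem.Set.ofList (PySem.List.pyRange 0 L 1))
        (PySem.Set.ofList (am.map (fun p => p.1))))
    = (PySem.List.pyRange 0 L 1).all (fun i =>
        match am.find? (fun p => p.1 == i) with
        | none => false
        | some p => !(p.2 < 0 || N ≤ p.2)) := by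
  rw [Bool.eq_iff_iff]
  simp only [Bool.and_eq_true, List.all_eq_true, PySem.Set.equal_iff, PySem.Set.mem_ofList]
  constructor
  · rintro ⟨hall, hset⟩ i hi
    have hik : i ∈ am.map (fun p => p.1) := (hset i).mp hi
    rcases List.mem_map.mp hik with ⟨p, hpmem, hpk⟩
    have hfind : (am.find? (fun q => q.1 == i)).isSome := by
      rw [List.find?_isSome]
      exact ⟨p, hpmem, by simp [hpk]⟩
    rcases Option.isSome_iff_exists.mp hfind with ⟨q, hq⟩
    have hqmem : q ∈ am := List.mem_of_find?_eq_some hq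
    have := hall q hqmem
    simp only [hq]
    exact this.2
  · intro hB
    -- (a) every expected index is a key
    have hsub : PySem.List.pyRange 0 L 1 ⊆ am.map (fun p => p.1) := by
      intro i hi
      have := hB i hi
      cases hfq : am.find? (fun q => q.1 == i) with
      | none => rw [hfq] at this; exact absurd this (by simp)
      | some q =>
        have hqk : q.1 = i := by
          have := List.find?_some hfq; simpa using this
        exact List.mem_map.mpr ⟨q, List.mem_of_find?_eq_some hfq, hqk⟩
    -- (b) same length + nodup of the range ⟹ keys ~ range
    have hndR : (PySem.List.pyRange 0 L 1).Nodup := PySem.List.nodup_pyRange_one 0 L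
    have hlenR : (PySem.List.pyRange 0 L 1).length = am.length := by
      rw [PySem.List.length_pyRange_one]; omega
    have hperm : (PySem.List.pyRange 0 L 1).Perm (am.map (fun p => p.1)) := by
      refine (hndR.subperm hsub).perm_of_length_le ?_
      simp [hlenR]
    have hndK : (am.map (fun p => p.1)).Nodup := hperm.nodup_iff.mp hndR
    have hsub' : ∀ x ∈ am.map (fun p => p.1), x ∈ PySem.List.pyRange 0 L 1 :=
      fun x hx => hperm.mem_iff.mpr hx
    refine ⟨?_, fun x => ⟨fun hx => hsub hx, fun hx => hsub' x hx⟩⟩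
    intro p hp
    have hkR : p.1 ∈ PySem.List.pyRange 0 L 1 :=
      hsub' p.1 (List.mem_map_of_mem hp)
    have hkb := PySem.List.mem_pyRange_one.mp hkR
    have hfind : am.find? (fun q => q.1 == p.1) = some p := by
      have : (am.map Prod.fst).Nodup := by simpa using hndK
      exact pv_find_nodup am p this hp
    have hv := hB p.1 hkR
    rw [hfind] at hv
    simp only [Bool.not_eq_eq_eq_not, Bool.not_true, Bool.or_eq_false_iff,
      decide_eq_false_iff_not] at hv ⊢
    exact ⟨⟨by omega, by omega⟩, hv⟩

-- A's inner flag loop computes `all in-range`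
theorem pv_flag (am : List (Int × Int)) (L N : Int) :
    am.foldl (fun ok p =>
      if p.1 < 0 || L ≤ p.1 then false
      else if p.2 < 0 || N ≤ p.2 then false
      else ok) true
    = am.all (fun p => !(p.1 < 0 || L ≤ p.1) && !(p.2 < 0 || N ≤ p.2)) := by
  have h : (fun (ok : Bool) (p : Int × Int) =>
      if p.1 < 0 || L ≤ p.1 then false
      else if p.2 < 0 || N ≤ p.2 then false
      else ok)
    = fun ok p => if ((p.1 < 0 || L ≤ p.1) || (p.2 < 0 || N ≤ p.2)) then false else ok := by
    funext ok p
    by_cases h1 : (p.1 < 0 || L ≤ p.1) = true <;> simp [h1]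
  rw [h, PySem.List.foldl_if_false_eq]
  simp [List.all_eq_not_any_not]

-- ===== VERDICT (by name: the statement is the Claim_ definition above) =====
theorem validate_normalization_spec : Claim_equal_validate_normalization := by
  intro raw_text norm_text align_map _
  unfold Spec_validate_normalization validate_normalization validate_normalization_alt
  by_cases hlen : (align_map.length : Int) = PySem.Str.len raw_text
  · have hL : 0 ≤ PySem.Str.len raw_text := by
      rw [PySem.Str.len_eq]; positivity
    rw [if_neg (not_not_intro hlen), if_neg (not_not_intro hlen),
      pv_flag align_map (PySem.Str.len raw_text) (PySem.Str.len norm_text),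
      ← pv_core align_map (PySem.Str.len raw_text) (PySem.Str.len norm_text) hL hlen]
    cases hA : align_map.all (fun p =>
        !(p.1 < 0 || PySem.Str.len raw_text ≤ p.1) &&
        !(p.2 < 0 || PySem.Str.len norm_text ≤ p.2)) <;>
      cases hE : PySem.Set.equal (PySem.Set.ofList (PySem.List.pyRange 0 (PySem.Str.len raw_text) 1))
        (PySem.Set.ofList (align_map.map (fun p => p.1))) <;> simp
  · rw [if_pos hlen, if_pos hlen]
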